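-- pv_equiv track=rewrite | github.com/gizmodata/qgizmosql | qduckdb/duckdb_provider.py | _parse_uri
-- ===== SOURCE A (Python) =====
-- def _parse_uri(uri: str) -> [str | None, str | None]:
--     """Parse the uri and return the path to the database and the name of the table"""
--     path = None
--     table = None
--     for variable in uri.split(" "):
--         try:
--             key, value = variable.split("=")
--             if key == "path":
--                 path = value
--             elif key == "table":
--                 table = value
--         except ValueError:
--             pass
--
--     return path, table
-- ===== SOURCE B (Python) =====
-- def _parse_uri(uri: str) -> [str | None, str | None]:
--     """Parse the uri and return the path to the database and the name of the table"""
--     pairs = [(p[0], p[1]) for t in uri.split(" ") if len(p := t.split("=")) == 2]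
--
--     def lookup(key):
--         for k, v in reversed(pairs):
--             if k == key:
--                 return v
--         return None
--
--     return lookup("path"), lookup("table")
-- ===== Notes on version B (the rewrite author's own statement) =====
-- stated objective: idiomatic
-- what changed: Replaces A's in-loop if/elif state machine with a comprehension that collects all key=value pairs (exactly-one-'=' tokens) and two post-loop last-match lookups for 'path' and 'table'.
import Mathlib
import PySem

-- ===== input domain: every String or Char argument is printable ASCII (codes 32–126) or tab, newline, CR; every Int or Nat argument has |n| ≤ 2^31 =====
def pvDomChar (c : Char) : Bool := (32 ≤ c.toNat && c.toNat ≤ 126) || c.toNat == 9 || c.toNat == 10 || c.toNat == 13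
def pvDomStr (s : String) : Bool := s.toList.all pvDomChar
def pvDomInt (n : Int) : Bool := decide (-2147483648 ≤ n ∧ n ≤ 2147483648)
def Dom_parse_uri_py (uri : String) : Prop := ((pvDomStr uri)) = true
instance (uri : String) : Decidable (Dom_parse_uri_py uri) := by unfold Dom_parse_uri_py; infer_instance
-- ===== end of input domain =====

-- B replaces A's in-loop if/elif state machine by a filtered pair list with two
-- last-match lookups (objective: idiomatic); same return value everywhere.

-- shared primitive: s.split(sep) for a nonempty literal sep (split? is some there)
def pvSplit (s sep : String) : List String := (PySem.Str.split? s sep).getD []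

-- ===== PORT A =====
-- one loop iteration: try key, value = variable.split("="); if/elif; except ValueError: pass
def pvStepA (st : Option String × Option String) (var : String) :
    Option String × Option String :=
  match pvSplit var "=" with
  | [key, value] =>
      if key = "path" then (some value, st.2)
      else if key = "table" then (st.1, some value)
      else st
  | _ => st    -- ValueError (not exactly 2 parts): pass

def parse_uri_py (uri : String) : Option String × Option String :=
  (pvSplit uri " ").foldl pvStepA (none, none)

-- ===== PORT B =====
-- the comprehension: keep (k, v) for each token whose split("=") has exactly 2 parts
def pvPairsB (toks : List String) : List (String × String) :=
  toks.filterMap (fun t =>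
    match pvSplit t "=" with
    | [k, v] => some (k, v)
    | _ => none)

-- lookup(key): first match scanning the reversed pair list
def pvLookupB (pairs : List (String × String)) (key : String) : Option String :=
  (pairs.reverse.find? (fun p => p.1 == key)).map Prod.snd

def parse_uri_py_alt (uri : String) : Option String × Option String :=
  let pairs := pvPairsB (pvSplit uri " ")
  (pvLookupB pairs "path", pvLookupB pairs "table")

-- ===== PRECONDITION & SPEC =====
def Spec_parse_uri_py (uri : String) (out : Option String × Option String) : Prop := out = parse_uri_py_alt uri
instance (uri : String) (out : Option String × Option String) : Decidable (Spec_parse_uri_py uri out) := by unfold Spec_parse_uri_py; infer_instance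

-- ===== CLAIM (what is proved, stated in full; the proofs are below) =====
def Claim_equal_parse_uri_py : Prop := ∀ (uri : String), Dom_parse_uri_py uri → Spec_parse_uri_py uri (parse_uri_py uri)

-- ===== LEMMAS AND PROOFS =====

theorem pvLookupB_cons (x : String × String) (ps : List (String × String)) (key : String) :
    pvLookupB (x :: ps) key =
      Option.or (pvLookupB ps key) (if x.1 == key then some x.2 else none) := by
  simp only [pvLookupB, List.reverse_cons, List.find?_append]
  cases h : List.find? (fun p => p.1 == key) ps.reverse <;>
    cases hx : x.1 == key <;> simp [List.find?, hx, Option.or]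

theorem pv_fold_eq (toks : List String) (p t : Option String) :
    toks.foldl pvStepA (p, t) =
      (Option.or (pvLookupB (pvPairsB toks) "path") p,
       Option.or (pvLookupB (pvPairsB toks) "table") t) := by
  induction toks generalizing p t with
  | nil => simp [pvPairsB, pvLookupB]
  | cons h tl ih =>
    simp only [List.foldl_cons]
    have hpairs : pvPairsB (h :: tl) =
        (match pvSplit h "=" with | [k, v] => some (k, v) | _ => none).toList ++ pvPairsB tl := by
      simp [pvPairsB, List.filterMap_cons]
      cases hs : pvSplit h "=" with
      | nil => simp
      | cons a rest => cases rest with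
        | nil => simp
        | cons b rest2 => cases rest2 <;> simp
    cases hs : pvSplit h "=" with
    | nil => rw [ih, hpairs]; simp [pvStepA, hs]
    | cons a rest =>
      cases rest with
      | nil => rw [ih, hpairs]; simp [pvStepA, hs]
      | cons b rest2 =>
        cases rest2 with
        | nil =>
          rw [hpairs, hs]
          simp only [Option.toList_some, List.singleton_append, pvLookupB_cons]
          by_cases hp : a = "path"
          · subst hp
            rw [show pvStepA (p, t) h = (some b, t) by simp [pvStepA, hs]]
            rw [ih (some b) t]
            cases hq : pvLookupB (pvPairsB tl) "path" <;>
              cases hr : pvLookupB (pvPairsB tl) "table" <;> simp [Option.or]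
          · by_cases ht : a = "table"
            · subst ht
              rw [show pvStepA (p, t) h = (p, some b) by simp [pvStepA, hs]]
              rw [ih p (some b)]
              cases hq : pvLookupB (pvPairsB tl) "path" <;>
                cases hr : pvLookupB (pvPairsB tl) "table" <;> simp [Option.or]
            · rw [show pvStepA (p, t) h = (p, t) by simp [pvStepA, hs, hp, ht]]
              rw [ih p t]
              cases hq : pvLookupB (pvPairsB tl) "path" <;>
                cases hr : pvLookupB (pvPairsB tl) "table" <;> simp [Option.or, hp, ht]
        | cons c rest3 => rw [ih, hpairs]; simp [pvStepA, hs]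

-- ===== VERDICT (by name: the statement is the Claim_ definition above) =====
theorem parse_uri_py_spec : Claim_equal_parse_uri_py := by
  intro uri _
  unfold Spec_parse_uri_py parse_uri_py parse_uri_py_alt
  rw [pv_fold_eq]
  cases h1 : pvLookupB (pvPairsB (pvSplit uri " ")) "path" <;>
    cases h2 : pvLookupB (pvPairsB (pvSplit uri " ")) "table" <;> simp [Option.or, h1, h2]
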